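-- pv_equiv track=rewrite | github.com/utkarshmall13/motionSynth | src/Lib/bvh23d.py | children_lines
-- ===== SOURCE A (Python) =====
-- def children_lines(header):
-- 	assert header[1]=='{'
-- 	assert header[-1]=='}'
-- 	ret = []
-- 	counter = 0
-- 	for i in range(len(header)):
-- 		if(header[i]=='{'):
-- 			if(counter==0):
-- 				start = i-1
-- 			counter+=1
-- 		elif(header[i]=='}'):
-- 			counter-=1
-- 			if(counter==0):
-- 				end = i+1
-- 				ret.append((start,end))
-- 	return ret
-- ===== SOURCE B (Python) =====
-- def children_lines(header):
--     assert header[1]=='{'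
--     assert header[-1]=='}'
--     # depths[i] = brace depth just BEFORE token i
--     depths = [0]
--     d = 0
--     for t in header:
--         d += (t == '{') - (t == '}')
--         depths.append(d)
--     # top-level opens and closes collected independently; the k-th open is
--     # paired with the k-th close (crossings of the 0/1 depth boundary alternate)
--     opens  = [i - 1 for i, t in enumerate(header) if t == '{' and depths[i] == 0]
--     closes = [i + 1 for i, t in enumerate(header) if t == '}' and depths[i] == 1]
--     return list(zip(opens, closes))
-- ===== Notes on version B (the rewrite author's own statement) =====
-- stated objective: alternative
-- what changed: Replaces A's stateful counter/start state machine by a stateless pairing algorithm: compute the prefix-depth table, collect all top-level open positions and all top-level close positions independently by comprehension, and zip the k-th open with the k-th close (correct because crossings of the 0/1 depth boundary strictly alternate).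
import Mathlib
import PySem

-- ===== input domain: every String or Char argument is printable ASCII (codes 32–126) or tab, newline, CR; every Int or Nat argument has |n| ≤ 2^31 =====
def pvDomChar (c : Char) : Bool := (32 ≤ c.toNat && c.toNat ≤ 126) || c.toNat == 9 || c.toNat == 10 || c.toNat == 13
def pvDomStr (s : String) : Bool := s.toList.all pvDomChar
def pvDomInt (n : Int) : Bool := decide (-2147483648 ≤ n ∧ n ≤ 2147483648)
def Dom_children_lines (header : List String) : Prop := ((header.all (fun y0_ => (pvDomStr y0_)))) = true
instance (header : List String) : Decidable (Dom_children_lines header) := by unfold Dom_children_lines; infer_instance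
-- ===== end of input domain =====

-- B replaces A's counter/start state machine by a stateless pairing: prefix-depth table,
-- then zip the independently collected top-level open and close positions (alternative, same cost).

-- ===== PORT A =====
-- A's loop: for i in range(len(header)) with state (ret, counter, start); start is
-- unbound until the first top-level '{' (modelled as Option, .getD 0 at the use site,
-- which is unreachable in Python as the 0->1 counter step always sets start first).
def children_lines (header : List String) : List (Int × Int) :=
  ((PySem.List.pyRange 0 (header.length : Int) 1).foldl
    (fun (st : List (Int × Int) × Int × Option Int) i =>
      let tok := PySem.List.pyGetD header i ""
      if tok = "{" then
        (st.1, st.2.1 + 1, if st.2.1 = 0 then some (i - 1) else st.2.2)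
      else if tok = "}" then
        if st.2.1 - 1 = 0 then (st.1 ++ [(st.2.2.getD 0, i + 1)], st.2.1 - 1, st.2.2)
        else (st.1, st.2.1 - 1, st.2.2)
      else st)
    ([], 0, none)).1

-- ===== PORT B =====
-- Source B's depths list: depths[i] = brace depth just before token i (built as [0] + running sums).
def childDepths (header : List String) : List Int :=
  (header.foldl
    (fun (acc : List Int × Int) t =>
      let d := acc.2 + ((if t = "{" then (1 : Int) else 0) - (if t = "}" then (1 : Int) else 0))
      (acc.1 ++ [d], d)) ([0], 0)).1

-- Source B: opens / closes comprehensions over enumerate(header), then zip.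
def children_lines_alt (header : List String) : List (Int × Int) :=
  (((PySem.List.enumerate header 0).filter
      (fun p => p.2 == "{" && PySem.List.pyGetD (childDepths header) p.1 0 == 0)).map
    (fun p => p.1 - 1)).zip
  (((PySem.List.enumerate header 0).filter
      (fun p => p.2 == "}" && PySem.List.pyGetD (childDepths header) p.1 0 == 1)).map
    (fun p => p.1 + 1))

-- ===== PRECONDITION & SPEC =====
-- Pre_ excludes exactly the inputs where A's asserts fail (AssertionError) or header is
-- too short for the indexing (IndexError): header[1] must be '{' and header[-1] must be '}'.
def Pre_children_lines (header : List String) : Prop :=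
  PySem.List.pyGet? header 1 = some "{" ∧ PySem.List.pyGet? header (-1) = some "}"
instance (header : List String) : Decidable (Pre_children_lines header) := by unfold Pre_children_lines; infer_instance
def pvWitness_children_lines : List String := ["root", "{", "a", "{", "}", "}"]
def Spec_children_lines (header : List String) (out : List (Int × Int)) : Prop := out = children_lines_alt header
instance (header : List String) (out : List (Int × Int)) : Decidable (Spec_children_lines header out) := by unfold Spec_children_lines; infer_instance

-- ===== CLAIM (what is proved, stated in full; the proofs are below) =====
def Claim_equal_children_lines : Prop := ∀ (header : List String), Dom_children_lines header → Pre_children_lines header → Spec_children_lines header (children_lines header)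

-- ===== LEMMAS AND PROOFS =====

-- token's depth contribution
def pvDelta (t : String) : Int := (if t = "{" then (1 : Int) else 0) - (if t = "}" then (1 : Int) else 0)

-- depths AFTER each token, starting from depth c
def pvDepths (c : Int) : List String → List Int
  | [] => []
  | t :: ts => (c + pvDelta t) :: pvDepths (c + pvDelta t) ts

-- top-level open markers (i-1 at each 0->1 crossing) and close markers (i+1 at each 1->0 crossing)
def pvOpens : List String → Int → Int → List Int
  | [], _, _ => []
  | t :: ts, i, c => (if t = "{" ∧ c = 0 then [i - 1] else []) ++ pvOpens ts (i + 1) (c + pvDelta t)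

def pvCloses : List String → Int → Int → List Int
  | [], _, _ => []
  | t :: ts, i, c => (if t = "}" ∧ c = 1 then [i + 1] else []) ++ pvCloses ts (i + 1) (c + pvDelta t)

theorem pvZipSnocLeft {α β : Type} (l1 : List α) (l2 : List β) (x : α)
    (h : l2.length ≤ l1.length) : (l1 ++ [x]).zip l2 = l1.zip l2 := by
  induction l1 generalizing l2 with
  | nil => cases l2 with
    | nil => simp
    | cons b bs => simp at h
  | cons a as ih => cases l2 with
    | nil => simp
    | cons b bs =>
      simp only [List.cons_append, List.zip_cons_cons, List.cons.injEq, true_and]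
      exact ih bs (by simpa using h)

theorem pvFirstPass (ts : List String) : ∀ (acc : List Int) (c : Int),
    (ts.foldl (fun (acc : List Int × Int) tok =>
      let d := acc.2 + ((if tok = "{" then (1 : Int) else 0) - (if tok = "}" then (1 : Int) else 0))
      (acc.1 ++ [d], d)) (acc, c)).1 = acc ++ pvDepths c ts := by
  induction ts with
  | nil => intro acc c; simp [pvDepths]
  | cons t ts ih => intro acc c; simp only [List.foldl_cons, pvDepths, ih, pvDelta]; simp

theorem childDepths_eq (header : List String) : childDepths header = 0 :: pvDepths 0 header := by
  unfold childDepths; rw [pvFirstPass]; rfl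

-- reading the depth-before table at an absolute index
theorem pvDepthAt (D : List Int) (k : Int) (c : Int) (rest : List Int)
    (hk : 0 ≤ k) (hdrop : D.drop k.toNat = c :: rest) :
    PySem.List.pyGetD D k 0 = c := by
  have hget : D[k.toNat]? = some c := by
    rw [← List.head?_drop, hdrop]; rfl
  have hk' : k = (k.toNat : Int) := (Int.toNat_of_nonneg hk).symm
  rw [hk', PySem.List.pyGetD_natCast, List.getD_eq_getElem?_getD, hget]; rfl

-- B's opens comprehension = pvOpens
theorem pvOpensEq (ts : List String) : ∀ (k c : Int) (D : List Int), 0 ≤ k →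
    D.drop k.toNat = c :: pvDepths c ts →
    ((PySem.List.enumerate ts k).filter
        (fun p => p.2 == "{" && PySem.List.pyGetD D p.1 0 == 0)).map (fun p => p.1 - 1)
      = pvOpens ts k c := by
  induction ts with
  | nil => intro k c D _ _; simp [PySem.List.enumerate_nil, pvOpens]
  | cons t ts ih =>
    intro k c D hk hdrop
    have hD : PySem.List.pyGetD D k 0 = c := pvDepthAt D k c _ hk hdrop
    have hdrop' : D.drop (k + 1).toNat = (c + pvDelta t) :: pvDepths (c + pvDelta t) ts := by
      have h1 : (k + 1).toNat = k.toNat + 1 := by omega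
      rw [h1, ← List.drop_drop, hdrop]
      simp [pvDepths]
    have htail := ih (k + 1) (c + pvDelta t) D (by omega) hdrop'
    simp only [PySem.List.enumerate_cons, List.filter_cons, hD]
    by_cases ht : t = "{"
    · by_cases hc : c = 0
      · simp [ht, hc, pvOpens, htail]
      · simp [ht, hc, pvOpens, htail]
    · simp [ht, pvOpens, htail]

-- B's closes comprehension = pvCloses
theorem pvClosesEq (ts : List String) : ∀ (k c : Int) (D : List Int), 0 ≤ k →
    D.drop k.toNat = c :: pvDepths c ts →
    ((PySem.List.enumerate ts k).filter
        (fun p => p.2 == "}" && PySem.List.pyGetD D p.1 0 == 1)).map (fun p => p.1 + 1)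
      = pvCloses ts k c := by
  induction ts with
  | nil => intro k c D _ _; simp [PySem.List.enumerate_nil, pvCloses]
  | cons t ts ih =>
    intro k c D hk hdrop
    have hD : PySem.List.pyGetD D k 0 = c := pvDepthAt D k c _ hk hdrop
    have hdrop' : D.drop (k + 1).toNat = (c + pvDelta t) :: pvDepths (c + pvDelta t) ts := by
      have h1 : (k + 1).toNat = k.toNat + 1 := by omega
      rw [h1, ← List.drop_drop, hdrop]
      simp [pvDepths]
    have htail := ih (k + 1) (c + pvDelta t) D (by omega) hdrop'
    simp only [PySem.List.enumerate_cons, List.filter_cons, hD]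
    by_cases ht : t = "}"
    · by_cases hc : c = 1
      · simp [ht, hc, pvCloses, htail]
      · simp [ht, hc, pvCloses, htail]
    · simp [ht, pvCloses, htail]

-- A's loop invariant: ret is the zip of the opens/closes seen so far; when the counter is
-- positive the last open is pending in start, otherwise opens and closes are balanced.
theorem pvA (ts : List String) : ∀ (i c : Int) (s : Option Int) (ret : List (Int × Int))
    (op cl : List Int),
    ret = op.zip cl →
    (1 ≤ c → ∃ op' o, op = op' ++ [o] ∧ op'.length = cl.length ∧ s = some o) →
    (c ≤ 0 → op.length = cl.length) →
    ((PySem.List.enumerate ts i).foldl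
      (fun (st : List (Int × Int) × Int × Option Int) p =>
        if p.2 = "{" then
          (st.1, st.2.1 + 1, if st.2.1 = 0 then some (p.1 - 1) else st.2.2)
        else if p.2 = "}" then
          if st.2.1 - 1 = 0 then (st.1 ++ [(st.2.2.getD 0, p.1 + 1)], st.2.1 - 1, st.2.2)
          else (st.1, st.2.1 - 1, st.2.2)
        else st) (ret, c, s)).1
      = (op ++ pvOpens ts i c).zip (cl ++ pvCloses ts i c) := by
  induction ts with
  | nil =>
    intro i c s ret op cl h1 _ _
    simp [PySem.List.enumerate_nil, pvOpens, pvCloses, h1]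
  | cons t ts ih =>
    intro i c s ret op cl h1 h2 h3
    simp only [PySem.List.enumerate_cons, List.foldl_cons]
    by_cases ht : t = "{"
    · by_cases hc : c = 0
      · have hlen : op.length = cl.length := h3 (le_of_eq hc)
        have H := ih (i + 1) (c + 1) (some (i - 1)) ret (op ++ [i - 1]) cl
          (by rw [h1, pvZipSnocLeft op cl _ (le_of_eq hlen.symm)])
          (fun _ => ⟨op, i - 1, rfl, hlen, rfl⟩)
          (by omega)
        simpa [ht, hc, pvOpens, pvCloses, pvDelta, List.append_assoc] using H
      · rcases lt_or_ge 0 c with hpos | hneg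
        · have H := ih (i + 1) (c + 1) s ret op cl h1 (fun _ => h2 (by omega)) (by omega)
          simpa [ht, hc, pvOpens, pvCloses, pvDelta] using H
        · have H := ih (i + 1) (c + 1) s ret op cl h1 (by omega) (fun _ => h3 (by omega))
          simpa [ht, hc, pvOpens, pvCloses, pvDelta] using H
    · by_cases ht2 : t = "}"
      · by_cases hc1 : c = 1
        · obtain ⟨op', o, hop, hlen, hs⟩ := h2 (le_of_eq hc1.symm)
          have hret' : ret ++ [(s.getD 0, i + 1)] = op.zip (cl ++ [i + 1]) := by
            rw [h1, hop, hs, pvZipSnocLeft op' cl o (le_of_eq hlen.symm),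
              List.zip_append hlen]
            rfl
          have H := ih (i + 1) (c - 1) s (ret ++ [(s.getD 0, i + 1)]) op (cl ++ [i + 1])
            hret' (by omega) (fun _ => by rw [hop]; simp [hlen])
          simpa [ht, ht2, hc1, hs, pvOpens, pvCloses, pvDelta, List.append_assoc] using H
        · rcases lt_or_ge 1 c with hpos | hneg
          · have H := ih (i + 1) (c - 1) s ret op cl h1 (fun _ => h2 (by omega)) (by omega)
            simpa [ht, ht2, hc1, show c - 1 ≠ 0 by omega, pvOpens, pvCloses, pvDelta] using H
          · have H := ih (i + 1) (c - 1) s ret op cl h1 (by omega) (fun _ => h3 (by omega))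
            simpa [ht, ht2, hc1, show c - 1 ≠ 0 by omega, pvOpens, pvCloses, pvDelta] using H
      · have H := ih (i + 1) c s ret op cl h1 h2 h3
        simpa [ht, ht2, pvOpens, pvCloses, pvDelta] using H

-- A's range-indexed fold is the fold over enumerate header 0
theorem pvAfold (header : List String) :
    children_lines header =
    ((PySem.List.enumerate header 0).foldl
      (fun (st : List (Int × Int) × Int × Option Int) p =>
        if p.2 = "{" then
          (st.1, st.2.1 + 1, if st.2.1 = 0 then some (p.1 - 1) else st.2.2)
        else if p.2 = "}" then
          if st.2.1 - 1 = 0 then (st.1 ++ [(st.2.2.getD 0, p.1 + 1)], st.2.1 - 1, st.2.2)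
          else (st.1, st.2.1 - 1, st.2.2)
        else st) ([], 0, none)).1 := by
  unfold children_lines
  rw [PySem.List.enumerate_eq_map_pyRange (d := ""), List.foldl_map]
  rfl

-- ===== VERDICT (by name: the statement is the Claim_ definition above) =====
theorem children_lines_spec : Claim_equal_children_lines := by
  intro header _ _
  have hdrop : (childDepths header).drop (0 : Int).toNat = 0 :: pvDepths 0 header := by
    rw [childDepths_eq]; rfl
  have hA := pvA header 0 0 none [] [] [] rfl (by omega) (fun _ => rfl)
  unfold Spec_children_lines children_lines_alt
  rw [pvAfold, hA,
    pvOpensEq header 0 0 (childDepths header) le_rfl hdrop,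
    pvClosesEq header 0 0 (childDepths header) le_rfl hdrop]
  simp
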